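-- pv_equiv track=rewrite | github.com/Raj-3435/Efficient-PRA-Simulator-Project | Page_replacement_sim_upd2.py | lru_page_replacement
-- ===== SOURCE A (Python) =====
-- def lru_page_replacement(pages, frames):
--     frame_list = []
--     history = []
--     hits, misses = 0, 0
--     page_order = []
--
--     for page in pages:
--         if page in frame_list:
--             hits += 1
--             page_order.remove(page)
--         else:
--             misses += 1
--             if len(frame_list) < frames:
--                 frame_list.append(page)
--             else:
--                 lru_page = page_order.pop(0)
--                 frame_list[frame_list.index(lru_page)] = page
--
--         page_order.append(page)
--         history.append(frame_list.copy())
--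
--     return history, hits, misses
-- ===== SOURCE B (Python) =====
-- def lru_page_replacement(pages, frames):
--     history = []
--     fl = []
--     stamps = []
--     for t, p in enumerate(pages):
--         if p in fl:
--             stamps[fl.index(p)] = t
--         else:
--             if len(fl) < frames:
--                 fl = fl + [p]
--                 stamps.append(t)
--             else:
--                 v = stamps.index(min(stamps))
--                 fl = fl.copy()
--                 fl[v] = p
--                 stamps[v] = t
--         history.append(fl)
--     hits = sum(1 for f, g in zip(history, history[1:]) if f == g)
--     return history, hits, len(pages) - hits
-- ===== Notes on version B (the rewrite author's own statement) =====
-- stated objective: alternative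
-- what changed: B drops A's page_order recency queue and the in-loop hit/miss counters: one pass keeps the frame slots plus a parallel last-use timestamp list (on a hit it restamps the page's slot, on an eviction it overwrites the slot holding the minimal stamp), then hits are recounted afterwards by zipping pages[1:] against the recorded history and misses is len(pages) - hits.
import Mathlib
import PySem

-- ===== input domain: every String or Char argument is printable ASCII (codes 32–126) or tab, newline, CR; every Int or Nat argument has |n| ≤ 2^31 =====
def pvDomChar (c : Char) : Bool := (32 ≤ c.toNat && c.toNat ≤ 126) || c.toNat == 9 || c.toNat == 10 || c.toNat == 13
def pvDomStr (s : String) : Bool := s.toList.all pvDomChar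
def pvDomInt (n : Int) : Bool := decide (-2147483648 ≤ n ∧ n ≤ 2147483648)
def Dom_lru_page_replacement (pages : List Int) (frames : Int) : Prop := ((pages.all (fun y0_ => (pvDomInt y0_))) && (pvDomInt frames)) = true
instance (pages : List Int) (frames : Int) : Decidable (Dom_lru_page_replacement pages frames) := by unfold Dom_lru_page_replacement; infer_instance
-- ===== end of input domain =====

-- B drops A's page_order recency queue and the in-loop hit/miss counters: one pass keeps the frame
-- slots plus a parallel last-use timestamp list (eviction = slot of the minimal stamp), and hits
-- are recounted afterwards by zipping pages[1:] with the history (alternative, same cost).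

-- ===== PORT A =====
-- one loop iteration of A: state = (frame_list, history, hits, misses, page_order)
def lruStepA (frames : Int) (st : List Int × List (List Int) × Int × Int × List Int) (page : Int) :
    List Int × List (List Int) × Int × Int × List Int :=
  let (fl, hist, hits, misses, po) := st
  if fl.contains page then
    -- hits += 1; page_order.remove(page)  (page is always present; getD branch unreachable)
    let po := (PySem.List.remove? po page).getD po
    (fl, hist ++ [fl], hits + 1, misses, po ++ [page])
  else
    if (fl.length : Int) < frames then
      let fl := fl ++ [page]
      (fl, hist ++ [fl], hits, misses + 1, po ++ [page])
    else
      match po with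
      | [] => (fl, hist, hits, misses, po)  -- page_order.pop(0) raises IndexError here; excluded by Pre_
      | lru :: rest =>
        let fl := match PySem.List.index? fl lru with
                  | some j => fl.set j page
                  | none => fl  -- frame_list.index raises ValueError here; unreachable (lru ∈ frame_list)
        (fl, hist ++ [fl], hits, misses + 1, rest ++ [page])

def lru_page_replacement (pages : List Int) (frames : Int) : List (List Int) × Int × Int :=
  let st := pages.foldl (lruStepA frames) ([], [], 0, 0, [])
  (st.2.1, st.2.2.1, st.2.2.2.1)

-- ===== PORT B =====
-- the body of B's if/elif/else over one page: the new (frame slots, stamp slots)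
def lruPlace (frames : Int) (fl stamps : List Int) (page t : Int) : List Int × List Int :=
  if fl.contains page then
    -- stamps[fl.index(p)] = t
    match PySem.List.index? fl page with
    | some i => (fl, stamps.set i t)
    | none => (fl, stamps)  -- fl.index raises ValueError here; unreachable (page ∈ fl)
  else if (fl.length : Int) < frames then (fl ++ [page], stamps ++ [t])
  else
    -- v = stamps.index(min(stamps)); fl = fl.copy(); fl[v] = p; stamps[v] = t
    match PySem.List.min? stamps (fun x => x) with
    | some m =>
      match PySem.List.index? stamps m with
      | some v => (fl.set v page, stamps.set v t)
      | none => (fl, stamps)  -- stamps.index raises ValueError here; unreachable (m ∈ stamps)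
    | none => (fl, stamps)  -- min() of the empty stamps list raises ValueError; excluded by Pre_

-- one iteration of B's 'for t, p in enumerate(pages)': state = (history, fl, stamps)
def lruSlotStep (frames : Int) (st : List (List Int) × List Int × List Int)
    (tp : Int × Int) : List (List Int) × List Int × List Int :=
  let (hist, fl, stamps) := st
  let (fl, stamps) := lruPlace frames fl stamps tp.2 tp.1
  (hist ++ [fl], fl, stamps)

def lru_page_replacement_alt (pages : List Int) (frames : Int) : List (List Int) × Int × Int :=
  let st := (PySem.List.enumerate pages 0).foldl (lruSlotStep frames) ([], [], [])
  let hist := st.1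
  -- hits = sum(1 for f, g in zip(history, history[1:]) if f == g)
  let hits := (hist.zip (PySem.List.slice hist (some 1) none)).foldl
    (fun a fg => if fg.1 == fg.2 then a + 1 else a) (0 : Int)
  (hist, hits, (pages.length : Int) - hits)

-- ===== PRECONDITION & SPEC =====
-- Pre_ excludes exactly the inputs where A raises: frames ≤ 0 with a nonempty reference string
-- makes A's page_order.pop(0) raise IndexError on the first page (B's min() raises there too).
def Pre_lru_page_replacement (pages : List Int) (frames : Int) : Prop :=
  pages = [] ∨ 1 ≤ frames
instance (pages : List Int) (frames : Int) : Decidable (Pre_lru_page_replacement pages frames) := by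
  unfold Pre_lru_page_replacement; infer_instance
def pvWitness_lru_page_replacement : List Int × Int := ([1, 2, 3, 2, 4, 1], 2)

def Spec_lru_page_replacement (pages : List Int) (frames : Int) (out : List (List Int) × Int × Int) : Prop := out = lru_page_replacement_alt pages frames
instance (pages : List Int) (frames : Int) (out : List (List Int) × Int × Int) : Decidable (Spec_lru_page_replacement pages frames out) := by unfold Spec_lru_page_replacement; infer_instance

-- ===== CLAIM (what is proved, stated in full; the proofs are below) =====
def Claim_equal_lru_page_replacement : Prop := ∀ (pages : List Int) (frames : Int), Dom_lru_page_replacement pages frames → Pre_lru_page_replacement pages frames → Spec_lru_page_replacement pages frames (lru_page_replacement pages frames)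

-- ===== LEMMAS AND PROOFS =====

-- proof-side clocked form of B's first pass: the enumerate fold with the clock made explicit
def lruGo (frames : Int) (st : List (List Int) × List Int × List Int × Int)
    (page : Int) : List (List Int) × List Int × List Int × Int :=
  let (hist, fl, stamps, t) := st
  let (fl, stamps) := lruPlace frames fl stamps page t
  (hist ++ [fl], fl, stamps, t + 1)

-- hit count of B's second pass, as a countP over consecutive-frame pairs (prev prepended)
def hitE (prev : List Int) (fls : List (List Int)) : Int :=
  (((prev :: fls).zip fls).countP (fun q => q.1 == q.2) : Int)

-- Ghost invariant: lu is a timestamp dict tying A's page_order to B's stamp slots: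
-- frame_list has no duplicates, page_order is exactly frame_list's pages listed in strictly
-- increasing last-use order, all stamps are below the current clock t.
def lruInv (fl po : List Int) (lu : PySem.Dict Int Int) (t : Int) : Prop :=
  fl.Nodup ∧ po.Nodup ∧ (∀ p, p ∈ po ↔ p ∈ fl) ∧
  po.Pairwise (fun a b => lu.getD a 0 < lu.getD b 0) ∧
  (∀ p ∈ po, lu.getD p 0 < t)

theorem lruInv_getD_insert (lu : PySem.Dict Int Int) (page t q : Int) :
    (lu.insert page t).getD q 0 = if q = page then t else lu.getD q 0 :=
  PySem.Dict.getD_insert lu page q t 0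

-- changing the key only at one duplicate-free position is a set on the mapped list
theorem map_eq_map_set (fl : List Int) (f g : Int → Int) (j : Nat) (hj : j < fl.length)
    (hne : ∀ i (h : i < fl.length), i ≠ j → g fl[i] = f fl[i]) :
    fl.map g = (fl.map f).set j (g fl[j]) := by
  apply List.ext_getElem (by simp)
  intro i h1 h2
  simp only [List.getElem_map, List.getElem_set]
  split_ifs with hij
  · subst hij; rfl
  · exact hne i (by simpa using h1) (fun h => hij h.symm)

-- membership in a set-update of a duplicate-free list
theorem mem_set_nodup {fl : List Int} (hnd : fl.Nodup) {j : Nat} (hj : j < fl.length)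
    {lru page : Int} (hfj : fl[j] = lru) (x : Int) :
    x ∈ fl.set j page ↔ x = page ∨ (x ∈ fl ∧ x ≠ lru) := by
  rw [List.set_eq_take_append_cons_drop, if_pos hj]
  have hdecomp : fl = fl.take j ++ fl[j] :: fl.drop (j + 1) := by
    rw [List.getElem_cons_drop, List.take_append_drop]
  constructor
  · intro hx
    rcases List.mem_append.mp hx with h | h
    · right
      refine ⟨by rw [hdecomp]; exact List.mem_append.mpr (Or.inl h), ?_⟩
      intro hxl
      have : fl[j] ∈ fl.take j := by rw [hfj, ← hxl]; exact h
      have hnd' := hdecomp ▸ hnd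
      exact ((List.nodup_append.mp hnd').2.2 _ this _ List.mem_cons_self) rfl
    · rcases List.mem_cons.mp h with h | h
      · exact Or.inl h
      · right
        refine ⟨by rw [hdecomp]; exact List.mem_append.mpr (Or.inr (List.mem_cons_of_mem _ h)), ?_⟩
        intro hxl
        have hnd' := hdecomp ▸ hnd
        have := (List.nodup_cons.mp (List.nodup_append.mp hnd').2.1).1
        rw [hfj] at this
        exact this (hxl ▸ h)
  · intro hx
    rcases hx with h | ⟨hmem, hne⟩
    · rw [h]; exact List.mem_append.mpr (Or.inr List.mem_cons_self)
    · rw [hdecomp] at hmem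
      rcases List.mem_append.mp hmem with h | h
      · exact List.mem_append.mpr (Or.inl h)
      · rcases List.mem_cons.mp h with h | h
        · exact absurd (h.trans hfj) hne
        · exact List.mem_append.mpr (Or.inr (List.mem_cons_of_mem _ h))

theorem nodup_set_of_not_mem {fl : List Int} (hnd : fl.Nodup) {j : Nat} (hj : j < fl.length)
    {page : Int} (hp : page ∉ fl) : (fl.set j page).Nodup := by
  have hdecomp : fl = fl.take j ++ fl[j] :: fl.drop (j + 1) := by
    rw [List.getElem_cons_drop, List.take_append_drop]
  rw [List.set_eq_take_append_cons_drop, if_pos hj]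
  have hnd' := hdecomp ▸ hnd
  rw [List.nodup_append] at hnd'
  obtain ⟨h1, h2, h3⟩ := hnd'
  rw [List.nodup_cons] at h2
  rw [List.nodup_append]
  refine ⟨h1, ?_, ?_⟩
  · rw [List.nodup_cons]
    refine ⟨fun h => hp ?_, h2.2⟩
    rw [hdecomp]; exact List.mem_append.mpr (Or.inr (List.mem_cons_of_mem _ h))
  · intro a ha b hb
    rcases List.mem_cons.mp hb with hb | hb
    · intro hab
      exact hp (by rw [hdecomp]; exact List.mem_append.mpr (Or.inl (hb ▸ hab ▸ ha)))
    · exact h3 _ ha _ (List.mem_cons_of_mem _ hb)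

-- the single-step agreement + invariant preservation (stamps = the frame slots' lu-keys)
theorem lruStep_eq (frames : Int) (hfr : 1 ≤ frames) (page : Int)
    (fl po : List Int) (histA histB : List (List Int)) (hits misses : Int)
    (lu : PySem.Dict Int Int) (t : Int) (hinv : lruInv fl po lu t) :
    ∃ fl' po',
      lruStepA frames (fl, histA, hits, misses, po) page =
        (fl', histA ++ [fl'], hits + (if fl.contains page then 1 else 0),
         misses + (1 - (if fl.contains page then 1 else 0)), po') ∧
      lruGo frames (histB, fl, fl.map (fun q => lu.getD q 0), t) page =
        (histB ++ [fl'], fl', fl'.map (fun q => (lu.insert page t).getD q 0), t + 1) ∧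
      (fl' = fl ↔ fl.contains page = true) ∧ fl' ≠ [] ∧
      lruInv fl' po' (lu.insert page t) (t + 1) := by
  obtain ⟨hndf, hndp, hmem, hpw, hlt⟩ := hinv
  have hkey : ∀ q, (lu.insert page t).getD q 0 = if q = page then t else lu.getD q 0 :=
    lruInv_getD_insert lu page t
  by_cases hin : fl.contains page
  · -- hit
    have hpf : page ∈ fl := by simpa using hin
    have hpo : page ∈ po := (hmem page).mpr hpf
    obtain ⟨i, hii⟩ : ∃ i, PySem.List.index? fl page = some i := by
      have := (PySem.List.index?_isSome_iff (xs := fl) (v := page)).mpr hpf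
      exact Option.isSome_iff_exists.mp this
    obtain ⟨hilt, hfli, -⟩ := PySem.List.getElem_of_index?_eq_some hii
    have hstamps : fl.map (fun q => (lu.insert page t).getD q 0) =
        (fl.map (fun q => lu.getD q 0)).set i t := by
      rw [map_eq_map_set fl (fun q => lu.getD q 0)
        (fun q => (lu.insert page t).getD q 0) i hilt
        (fun k hk hki => by
          show (lu.insert page t).getD fl[k] 0 = lu.getD fl[k] 0
          have hne : fl[k] ≠ page := by
            intro h
            exact hki (hndf.getElem_inj_iff.mp (h.trans hfli.symm))
          rw [hkey fl[k], if_neg hne])]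
      simp [hkey, hfli]
    refine ⟨fl, po.erase page ++ [page], ?_, ?_, ⟨fun _ => hin, fun _ => rfl⟩, ?_, ?_⟩
    · simp only [lruStepA, hin, if_pos, PySem.List.remove?_eq_some_erase po page hpo,
        Option.getD_some]
      norm_num
    · simp only [lruGo, lruPlace, hin, if_true, hii, hstamps]
    · intro h0
      rw [h0] at hpf
      exact absurd hpf (List.not_mem_nil)
    · have hsub : (po.erase page).Sublist po := List.erase_sublist
      have herase : ∀ x, x ∈ po.erase page ↔ x ≠ page ∧ x ∈ po := fun x => hndp.mem_erase_iff
      refine ⟨hndf, ?_, ?_, ?_, ?_⟩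
      · rw [List.nodup_append]
        refine ⟨hndp.sublist hsub, List.nodup_singleton _, ?_⟩
        intro a ha b hb hab
        rw [List.mem_singleton.mp hb] at hab
        exact ((herase a).mp ha).1 hab
      · intro p
        constructor
        · intro hp
          rcases List.mem_append.mp hp with h | h
          · exact (hmem p).mp ((herase p).mp h).2
          · exact (List.mem_singleton.mp h) ▸ hpf
        · intro hp
          by_cases hpp : p = page
          · exact List.mem_append.mpr (Or.inr (by simp [hpp]))
          · exact List.mem_append.mpr (Or.inl ((herase p).mpr ⟨hpp, (hmem p).mpr hp⟩))
      · rw [List.pairwise_append]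
        refine ⟨?_, List.pairwise_singleton _ _, ?_⟩
        · refine (hpw.sublist hsub).imp_of_mem ?_
          intro a b ha hb hab
          rw [hkey a, hkey b, if_neg ((herase a).mp ha).1, if_neg ((herase b).mp hb).1]
          exact hab
        · intro a ha b hb
          rw [List.mem_singleton.mp hb, hkey a, hkey page,
            if_neg ((herase a).mp ha).1, if_pos rfl]
          exact hlt a ((herase a).mp ha).2
      · intro p hp
        rcases List.mem_append.mp hp with h | h
        · rw [hkey p, if_neg ((hndp.mem_erase_iff).mp h).1]
          exact lt_trans (hlt p ((hndp.mem_erase_iff).mp h).2) (by omega)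
        · rw [List.mem_singleton.mp h, hkey page, if_pos rfl]; omega
  · -- miss
    have hpf : page ∉ fl := by simpa using hin
    have hppo : page ∉ po := fun h => hpf ((hmem page).mp h)
    by_cases hroom : (fl.length : Int) < frames
    · -- free slot
      have hstamps : (fl ++ [page]).map (fun q => (lu.insert page t).getD q 0) =
          fl.map (fun q => lu.getD q 0) ++ [t] := by
        rw [List.map_append]
        congr 1
        · exact List.map_congr_left (fun x hx => by
            show (lu.insert page t).getD x 0 = lu.getD x 0
            have hne : x ≠ page := fun h => hpf (h ▸ hx)
            rw [hkey x, if_neg hne])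
        · simp [hkey]
      refine ⟨fl ++ [page], po ++ [page], ?_, ?_, ?_, by simp, ?_⟩
      · simp only [lruStepA, hin, Bool.false_eq_true, if_false, hroom, if_pos]
        norm_num
      · simp only [lruGo, lruPlace, hin, Bool.false_eq_true, if_false, hroom, if_pos, hstamps]
      · constructor
        · intro h0
          exact absurd (congrArg List.length h0) (by simp)
        · intro h0
          exact absurd h0 hin
      · refine ⟨?_, ?_, ?_, ?_, ?_⟩
        · rw [List.nodup_append]
          refine ⟨hndf, List.nodup_singleton _, ?_⟩
          intro a ha b hb hab
          rw [List.mem_singleton.mp hb] at hab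
          exact hpf (hab ▸ ha)
        · rw [List.nodup_append]
          refine ⟨hndp, List.nodup_singleton _, ?_⟩
          intro a ha b hb hab
          rw [List.mem_singleton.mp hb] at hab
          exact hppo (hab ▸ ha)
        · intro p
          simp only [List.mem_append, List.mem_singleton]
          exact or_congr_left (hmem p)
        · rw [List.pairwise_append]
          refine ⟨?_, List.pairwise_singleton _ _, ?_⟩
          · refine hpw.imp_of_mem ?_
            intro a b ha hb hab
            have hna : a ≠ page := fun h => hppo (h ▸ ha)
            have hnb : b ≠ page := fun h => hppo (h ▸ hb)
            rw [hkey a, hkey b, if_neg hna, if_neg hnb]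
            exact hab
          · intro a ha b hb
            have hna : a ≠ page := fun h => hppo (h ▸ ha)
            rw [List.mem_singleton.mp hb, hkey a, hkey page, if_neg hna, if_pos rfl]
            exact hlt a ha
        · intro p hp
          rcases List.mem_append.mp hp with h | h
          · have hnp : p ≠ page := fun hh => hppo (hh ▸ h)
            rw [hkey p, if_neg hnp]
            exact lt_trans (hlt p h) (by omega)
          · rw [List.mem_singleton.mp h, hkey page, if_pos rfl]; omega
    · -- eviction
      have hflne : fl ≠ [] := by
        intro h
        rw [h] at hroom
        simp at hroom
        omega
      obtain ⟨lru, rest, hpo⟩ : ∃ lru rest, po = lru :: rest := by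
        cases hpo : po with
        | nil =>
          obtain ⟨q, hq⟩ := List.exists_mem_of_ne_nil fl hflne
          exact absurd ((hmem q).mpr hq) (by rw [hpo]; simp)
        | cons a l => exact ⟨a, l, rfl⟩
      have hlru_fl : lru ∈ fl := (hmem lru).mp (by rw [hpo]; exact List.mem_cons_self)
      obtain ⟨j, hji⟩ : ∃ j, PySem.List.index? fl lru = some j := by
        have := (PySem.List.index?_isSome_iff (xs := fl) (v := lru)).mpr hlru_fl
        exact Option.isSome_iff_exists.mp this
      obtain ⟨hjlt, hflj, hjfirst⟩ := PySem.List.getElem_of_index?_eq_some hji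
      have hlrurest : lru ∉ rest := by
        have := hndp; rw [hpo, List.nodup_cons] at this; exact this.1
      have hrestmem : ∀ x, x ∈ rest ↔ x ∈ fl ∧ x ≠ lru := by
        intro x
        constructor
        · intro hx
          exact ⟨(hmem x).mp (by rw [hpo]; exact List.mem_cons_of_mem _ hx),
            fun h => hlrurest (h ▸ hx)⟩
        · intro ⟨hx, hne⟩
          have := (hmem x).mpr hx
          rw [hpo] at this
          rcases List.mem_cons.mp this with h | h
          · exact absurd h hne
          · exact h
      -- lru is the unique strict minimiser of the stamps over fl
      have hmin : ∀ x ∈ fl, x ≠ lru → lu.getD lru 0 < lu.getD x 0 := by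
        intro x hx hne
        have hxrest : x ∈ rest := (hrestmem _).mpr ⟨hx, hne⟩
        have := hpw
        rw [hpo, List.pairwise_cons] at this
        exact this.1 _ hxrest
      -- min(stamps) is lru's stamp
      have hminval : PySem.List.min? (fl.map (fun q => lu.getD q 0)) (fun x => x) =
          some (lu.getD lru 0) := by
        cases hm : PySem.List.min? (fl.map (fun q => lu.getD q 0)) (fun x => x) with
        | none =>
          rw [PySem.List.min?_eq_none_iff] at hm
          have : lu.getD lru 0 ∈ fl.map (fun q => lu.getD q 0) := List.mem_map_of_mem hlru_fl
          rw [hm] at this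
          exact absurd this (List.not_mem_nil)
        | some m =>
          obtain ⟨q, hq, hqm⟩ := List.mem_map.mp (PySem.List.min?_mem hm)
          have hle := PySem.List.min?_isMin hm (lu.getD lru 0) (List.mem_map_of_mem hlru_fl)
          by_cases heq : q = lru
          · rw [← hqm, heq]
          · exact absurd (hqm ▸ hmin q hq heq) (by simp only [not_lt]; exact hle)
      -- stamps.index(min(stamps)) is lru's slot j
      have hidxval : PySem.List.index? (fl.map (fun q => lu.getD q 0)) (lu.getD lru 0) =
          some j := by
        rw [PySem.List.index?_eq_some_iff]
        refine ⟨(fl.take j).map (fun q => lu.getD q 0),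
          (fl.drop (j + 1)).map (fun q => lu.getD q 0), ?_, by simp [hjlt.le], ?_⟩
        · have hdec : fl = fl.take j ++ lru :: fl.drop (j + 1) := by
            rw [← hflj, List.getElem_cons_drop, List.take_append_drop]
          conv_lhs => rw [hdec]
          simp
        · intro hmemtake
          obtain ⟨q, hq, hqv⟩ := List.mem_map.mp hmemtake
          obtain ⟨k, hk, hkq⟩ := List.mem_take_iff_getElem.mp hq
          have hklt : k < j := by omega
          have hkfl : k < fl.length := by omega
          have hne : fl[k] ≠ lru := hjfirst k (by omega)
          have : q ∈ fl := by rw [← hkq]; exact List.getElem_mem hkfl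
          have := hmin q this (by rw [← hkq]; exact hne)
          omega
      have hstamps : (fl.set j page).map (fun q => (lu.insert page t).getD q 0) =
          (fl.map (fun q => lu.getD q 0)).set j t := by
        rw [List.map_set]
        have h1 := map_eq_map_set fl (fun q => lu.getD q 0)
            (fun q => (lu.insert page t).getD q 0) j hjlt
            (fun k hk hkj => by
              show (lu.insert page t).getD fl[k] 0 = lu.getD fl[k] 0
              have hne : fl[k] ≠ page := fun h => hpf (h ▸ List.getElem_mem hk)
              rw [hkey fl[k], if_neg hne])
        rw [h1, List.set_set]
        simp [hkey]
      have hsetne : fl.set j page ≠ fl := by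
        intro h0
        have h1 := List.getElem_of_eq h0 (i := j) (by simpa using hjlt)
        rw [List.getElem_set_self] at h1
        exact hpf (h1 ▸ List.getElem_mem hjlt)
      refine ⟨fl.set j page, rest ++ [page], ?_, ?_, ?_, ?_, ?_⟩
      · simp only [lruStepA, hin, Bool.false_eq_true, if_false, hroom, if_false, hpo, hji]
        norm_num
      · simp only [lruGo, lruPlace, hin, Bool.false_eq_true, if_false, hroom,
          hminval, hidxval, hstamps]
      · constructor
        · intro h0
          exact absurd h0 hsetne
        · intro h0
          exact absurd h0 hin
      · intro h0
        exact hflne (List.eq_nil_of_length_eq_zero (by simpa using congrArg List.length h0))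
      · have hmemset : ∀ x, x ∈ fl.set j page ↔ x = page ∨ (x ∈ fl ∧ x ≠ lru) :=
          mem_set_nodup hndf hjlt hflj
        have hrestpw : rest.Pairwise (fun a b => lu.getD a 0 < lu.getD b 0) := by
          have := hpw; rw [hpo, List.pairwise_cons] at this; exact this.2
        have hndr : rest.Nodup := by
          have := hndp; rw [hpo, List.nodup_cons] at this; exact this.2
        refine ⟨nodup_set_of_not_mem hndf hjlt hpf, ?_, ?_, ?_, ?_⟩
        · rw [List.nodup_append]
          refine ⟨hndr, List.nodup_singleton _, ?_⟩
          intro a ha b hb hab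
          rw [List.mem_singleton.mp hb] at hab
          exact hpf (hab ▸ ((hrestmem a).mp ha).1)
        · intro p
          rw [hmemset p, List.mem_append, List.mem_singleton, hrestmem p]
          tauto
        · rw [List.pairwise_append]
          refine ⟨?_, List.pairwise_singleton _ _, ?_⟩
          · refine hrestpw.imp_of_mem ?_
            intro a b ha hb hab
            have hna : a ≠ page := fun h => hpf (h ▸ ((hrestmem a).mp ha).1)
            have hnb : b ≠ page := fun h => hpf (h ▸ ((hrestmem b).mp hb).1)
            rw [hkey a, hkey b, if_neg hna, if_neg hnb]
            exact hab
          · intro a ha b hb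
            have hna : a ≠ page := fun h => hpf (h ▸ ((hrestmem a).mp ha).1)
            rw [List.mem_singleton.mp hb, hkey a, hkey page, if_neg hna, if_pos rfl]
            exact hlt a (by rw [hpo]; exact List.mem_cons_of_mem _ ha)
        · intro p hp
          rcases List.mem_append.mp hp with h | h
          · have hna : p ≠ page := fun hh => hpf (hh ▸ ((hrestmem p).mp h).1)
            rw [hkey p, if_neg hna]
            exact lt_trans (hlt p (by rw [hpo]; exact List.mem_cons_of_mem _ h)) (by omega)
          · rw [List.mem_singleton.mp h, hkey page, if_pos rfl]; omega

-- A's fold and the clocked form of B's pass agree, and A's counters are the zip recount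
theorem lruLoop_eq (frames : Int) (hfr : 1 ≤ frames) :
    ∀ (ps fl po : List Int) (histA histB : List (List Int)) (hits misses : Int)
      (lu : PySem.Dict Int Int) (t : Int), lruInv fl po lu t →
      ∃ H,
        (ps.foldl (lruStepA frames) (fl, histA, hits, misses, po)).2.1 = histA ++ H ∧
        (ps.foldl (lruGo frames) (histB, fl, fl.map (fun q => lu.getD q 0), t)).1 =
          histB ++ H ∧
        (ps.foldl (lruStepA frames) (fl, histA, hits, misses, po)).2.2.1 =
          hits + hitE fl H ∧
        (ps.foldl (lruStepA frames) (fl, histA, hits, misses, po)).2.2.2.1 =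
          misses + ((ps.length : Int) - hitE fl H) ∧
        (∀ f ∈ H, f ≠ ([] : List Int)) := by
  intro ps
  induction ps with
  | nil =>
    intro fl po histA histB hits misses lu t _
    exact ⟨[], by simp, by simp, by simp [hitE], by simp [hitE], by simp⟩
  | cons p rest ih =>
    intro fl po histA histB hits misses lu t hinv
    obtain ⟨fl', po', hA, hB, hiff, hne', hinv'⟩ :=
      lruStep_eq frames hfr p fl po histA histB hits misses lu t hinv
    simp only [List.foldl_cons, hA, hB]
    obtain ⟨H', e1, e2, e3, e4, e5⟩ := ih fl' po' (histA ++ [fl']) (histB ++ [fl'])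
      (hits + (if fl.contains p then 1 else 0))
      (misses + (1 - (if fl.contains p then 1 else 0))) (lu.insert p t) (t + 1) hinv'
    have hz : hitE fl (fl' :: H') =
        (if fl.contains p then 1 else 0) + hitE fl' H' := by
      by_cases hc : fl.contains p
      · have hmemp : p ∈ fl := by simpa using hc
        have h1 : fl' = fl := hiff.mpr hc
        simp only [hitE, List.zip_cons_cons, List.countP_cons, h1]
        simp [hmemp]
        ring
      · have hmemp : p ∉ fl := by simpa using hc
        have h1 : (fl == fl') = false := by
          rw [beq_eq_false_iff_ne]
          exact fun h => hc (hiff.mp h.symm)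
        simp only [hitE, List.zip_cons_cons, List.countP_cons, h1]
        simp [hmemp]
    refine ⟨fl' :: H', ?_, ?_, ?_, ?_, ?_⟩
    · rw [e1]; simp
    · rw [e2]; simp
    · rw [e3, hz]; ring
    · rw [e4, hz]
      simp only [List.length_cons]
      push_cast
      ring
    · intro f hf
      rcases List.mem_cons.mp hf with h | h
      · exact h ▸ hne'
      · exact e5 f h

-- B's fold over enumerate(pages) is the clocked fold over the pages themselves
theorem lruBridge (frames : Int) :
    ∀ (ps : List Int) (s : Int) (hist : List (List Int)) (fl stamps : List Int),
      (PySem.List.enumerate ps s).foldl (lruSlotStep frames) (hist, fl, stamps) =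
      ((ps.foldl (lruGo frames) (hist, fl, stamps, s)).1,
       (ps.foldl (lruGo frames) (hist, fl, stamps, s)).2.1,
       (ps.foldl (lruGo frames) (hist, fl, stamps, s)).2.2.1) := by
  intro ps
  induction ps with
  | nil =>
    intro s hist fl stamps
    simp [PySem.List.enumerate_nil]
  | cons p rest ih =>
    intro s hist fl stamps
    rw [PySem.List.enumerate_cons]
    simp only [List.foldl_cons]
    have hstep : lruSlotStep frames (hist, fl, stamps) (s, p) =
        ((lruGo frames (hist, fl, stamps, s) p).1,
         (lruGo frames (hist, fl, stamps, s) p).2.1,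
         (lruGo frames (hist, fl, stamps, s) p).2.2.1) := by
      simp only [lruSlotStep, lruGo]
    rw [hstep, ih (s + 1) (lruGo frames (hist, fl, stamps, s) p).1
      (lruGo frames (hist, fl, stamps, s) p).2.1
      (lruGo frames (hist, fl, stamps, s) p).2.2.1]
    have heta : ((lruGo frames (hist, fl, stamps, s) p).1,
        (lruGo frames (hist, fl, stamps, s) p).2.1,
        (lruGo frames (hist, fl, stamps, s) p).2.2.1, s + 1) =
        lruGo frames (hist, fl, stamps, s) p := rfl
    rw [heta]

-- B's second pass counts exactly hitE of the history prefixed with the empty frame list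
theorem hitE_tail (H : List (List Int)) (hne : ∀ f ∈ H, f ≠ ([] : List Int)) :
    hitE [] H = ((H.zip H.tail).countP (fun q => q.1 == q.2) : Int) := by
  cases H with
  | nil => simp [hitE]
  | cons h0 Hr =>
    have h1 : (([] : List Int) == h0) = false := by
      rw [beq_eq_false_iff_ne]
      exact fun h => hne h0 List.mem_cons_self h.symm
    simp [hitE, List.zip_cons_cons, h1]

theorem lruInv_init (t : Int) : lruInv [] [] PySem.Dict.empty t := by
  refine ⟨List.nodup_nil, List.nodup_nil, by simp, List.Pairwise.nil, by simp⟩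

-- ===== VERDICT (by name: the statement is the Claim_ definition above) =====
theorem lru_page_replacement_spec : Claim_equal_lru_page_replacement := by
  intro pages frames _ hpre
  unfold Spec_lru_page_replacement lru_page_replacement lru_page_replacement_alt
  rcases hpre with h | h
  · subst h
    simp [PySem.List.enumerate_nil, PySem.List.slice_from_one]
  · have hb := lruBridge frames pages 0 [] [] []
    obtain ⟨H, e1, e2, e3, e4, e5⟩ := lruLoop_eq frames h pages [] [] [] [] 0 0
      PySem.Dict.empty 0 (lruInv_init 0)
    simp only [List.map_nil] at e2
    simp only [List.nil_append] at e1 e2 e3 e4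
    simp only [hb, e1, e2, e3, e4, PySem.List.slice_from_one, PySem.List.foldl_if_add_one,
      hitE_tail H e5]
    simp
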